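-- pv_equiv track=rewrite | github.com/R-A-M-A-N-P-A-N-D-E-Y/Leetcode-Solution | 1903-largest-odd-number-in-string/1903-largest-odd-number-in-string.py | largestOddNumber
-- ===== SOURCE A (Python) =====
-- def largestOddNumber(num: str) -> str:
--
--     odd = "13579"
--     odd_set = set(odd)
--     n = len(num)
--     for i in range(n-1, -1, -1):
--         if num[i] in odd_set:
--             return num[:i+1]
--
--     return ""
-- ===== SOURCE B (Python) =====
-- def largestOddNumber(num: str) -> str:
--     last = -1
--     for i, ch in enumerate(num):
--         if ch in "13579":
--             last = i
--     return num[:last + 1]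
-- ===== Notes on version B (the rewrite author's own statement) =====
-- stated objective: alternative
-- what changed: Replaces A's right-to-left scan with early return by a single forward pass that accumulates the index of the last odd digit and slices once at the end.
import Mathlib
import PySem

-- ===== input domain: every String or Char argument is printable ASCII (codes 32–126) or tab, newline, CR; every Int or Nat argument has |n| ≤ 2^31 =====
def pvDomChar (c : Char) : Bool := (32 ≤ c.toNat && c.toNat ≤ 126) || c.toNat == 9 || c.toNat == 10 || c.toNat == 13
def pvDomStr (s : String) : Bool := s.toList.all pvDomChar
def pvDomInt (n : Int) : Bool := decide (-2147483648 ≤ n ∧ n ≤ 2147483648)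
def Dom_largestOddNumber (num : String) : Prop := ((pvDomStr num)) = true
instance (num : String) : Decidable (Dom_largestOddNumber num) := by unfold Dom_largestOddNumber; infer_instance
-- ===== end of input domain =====

-- B replaces A's right-to-left early-return scan by a single forward pass that
-- accumulates the index of the last odd digit and slices once at the end (alternative decomposition).

-- ===== PORT A =====
-- odd_set = set("13579")
def pvOddSetA : PySem.Set Char := PySem.Set.ofList "13579".toList

-- 'for i in range(n-1, -1, -1): if num[i] in odd_set: return num[:i+1]'; fuel k+1 means i = k;
-- index i is always in range, so List.getD reads exactly num[i].
def pvALoop (cs : List Char) : Nat → List Char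
  | 0 => []
  | k + 1 =>
    if PySem.Set.contains pvOddSetA (cs.getD k ' ') then
      PySem.List.slice cs none (some ((k : Int) + 1))
    else pvALoop cs k

def largestOddNumber (num : String) : String :=
  String.ofList (pvALoop num.toList num.toList.length)

-- ===== PORT B =====
-- 'for i, ch in enumerate(num): if ch in "13579": last = i'; single-char 'in' on a string is char membership.
def pvBLoop : List Char → Int → Int → Int
  | [], _, last => last
  | c :: cs, i, last => pvBLoop cs (i + 1) (if "13579".toList.contains c then i else last)

def largestOddNumber_alt (num : String) : String :=
  String.ofList (PySem.List.slice num.toList none (some (pvBLoop num.toList 0 (-1) + 1)))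

-- ===== PRECONDITION & SPEC =====
def Spec_largestOddNumber (num : String) (out : String) : Prop := out = largestOddNumber_alt num
instance (num : String) (out : String) : Decidable (Spec_largestOddNumber num out) := by unfold Spec_largestOddNumber; infer_instance

-- ===== CLAIM (what is proved, stated in full; the proofs are below) =====
def Claim_equal_largestOddNumber : Prop := ∀ (num : String), Dom_largestOddNumber num → Spec_largestOddNumber num (largestOddNumber num)

-- ===== LEMMAS AND PROOFS =====

-- the two odd-digit tests agree
theorem pv_odd_eq (c : Char) :
    PySem.Set.contains pvOddSetA c = "13579".toList.contains c := by
  rfl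

-- B's loop over cs ++ [c]: the appended element decides the final value
theorem pvBLoop_append (cs : List Char) (c : Char) (i last : Int) :
    pvBLoop (cs ++ [c]) i last =
      if "13579".toList.contains c then i + cs.length else pvBLoop cs i last := by
  induction cs generalizing i last with
  | nil => simp [pvBLoop]
  | cons d ds ih =>
      simp only [List.cons_append, pvBLoop, ih]
      split
      · simp only [List.length_cons]; push_cast; ring
      · rfl

-- B's accumulated index stays within bounds
theorem pvBLoop_bounds (cs : List Char) :
    -1 ≤ pvBLoop cs 0 (-1) ∧ pvBLoop cs 0 (-1) + 1 ≤ (cs.length : Int) := by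
  induction cs using List.reverseRecOn with
  | nil => simp [pvBLoop]
  | append_singleton ds d ih =>
      rw [pvBLoop_append]
      rcases ih with ⟨h1, h2⟩
      simp only [List.length_append, List.length_cons, List.length_nil]
      split_ifs
      · push_cast; omega
      · push_cast; omega

-- A's loop ignores elements beyond its fuel
theorem pvALoop_append (cs : List Char) (c : Char) (k : Nat) (hk : k ≤ cs.length) :
    pvALoop (cs ++ [c]) k = pvALoop cs k := by
  induction k with
  | zero => rfl
  | succ j ih =>
      have hj : j < cs.length := by omega
      have hget : (cs ++ [c]).getD j ' ' = cs.getD j ' ' := by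
        simp [List.getD, List.getElem?_append_left hj]
      simp only [pvALoop, hget]
      split
      · rw [show ((j : Int) + 1) = (((j + 1 : Nat) : Int)) by push_cast; ring,
            PySem.List.slice_to_natCast, PySem.List.slice_to_natCast,
            List.take_append_of_le_length (by omega)]
      · exact ih (by omega)

-- main invariant: A's backward scan equals B's slice by the last odd index
theorem pv_main (cs : List Char) :
    pvALoop cs cs.length = PySem.List.slice cs none (some (pvBLoop cs 0 (-1) + 1)) := by
  induction cs using List.reverseRecOn with
  | nil => rfl
  | append_singleton ds d ih =>
      have hlen : (ds ++ [d]).length = ds.length + 1 := by simp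
      rw [hlen]
      have hget : (ds ++ [d]).getD ds.length ' ' = d := by
        simp [List.getD]
      simp only [pvALoop, hget, pv_odd_eq, pvBLoop_append]
      split_ifs with hodd
      · norm_num
      · rw [pvALoop_append ds d ds.length le_rfl, ih]
        rcases pvBLoop_bounds ds with ⟨h1, h2⟩
        rw [PySem.List.slice_to (xs := ds) (by omega),
            PySem.List.slice_to (xs := ds ++ [d]) (by omega),
            List.take_append_of_le_length (by omega)]

-- ===== VERDICT (by name: the statement is the Claim_ definition above) =====
theorem largestOddNumber_spec : Claim_equal_largestOddNumber := by
  intro num _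
  unfold Spec_largestOddNumber largestOddNumber largestOddNumber_alt
  exact congrArg String.ofList (pv_main num.toList)
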